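-- pv_equiv track=rewrite | github.com/khelwood/advent-of-code | 2021/d26_checker.py | split_to_blocks
-- ===== SOURCE A (Python) =====
-- def split_to_blocks(lines):
--     a = 0
--     for i,line in enumerate(lines):
--         if line.startswith('inp '):
--             if i > a:
--                 yield lines[a:i]
--             a = i
--     yield lines[a:]
-- ===== SOURCE B (Python) =====
-- def split_to_blocks(lines):
--     idx = [i for i, line in enumerate(lines) if line.startswith('inp ')]
--     boundaries = [0] + [i for i in idx if i > 0]
--     for b, c in zip(boundaries, boundaries[1:]):
--         yield lines[b:c]
--     yield lines[boundaries[-1]:]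
-- ===== Notes on version B (the rewrite author's own statement) =====
-- stated objective: alternative
-- what changed: B first collects all marker indices with a comprehension, derives the block boundary list ([0] plus the positive marker indices), and yields the slices between consecutive boundaries plus the final tail slice, instead of A's single stateful loop that yields while scanning.
import Mathlib
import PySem

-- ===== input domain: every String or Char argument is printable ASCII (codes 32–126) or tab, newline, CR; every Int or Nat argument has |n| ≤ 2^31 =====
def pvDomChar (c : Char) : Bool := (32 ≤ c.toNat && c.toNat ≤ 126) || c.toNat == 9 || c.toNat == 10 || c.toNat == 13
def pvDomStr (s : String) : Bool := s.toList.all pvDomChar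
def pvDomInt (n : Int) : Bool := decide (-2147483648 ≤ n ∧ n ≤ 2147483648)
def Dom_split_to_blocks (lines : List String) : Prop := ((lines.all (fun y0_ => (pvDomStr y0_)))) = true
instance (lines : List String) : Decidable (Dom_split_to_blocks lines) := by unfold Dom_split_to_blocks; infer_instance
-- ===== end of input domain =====

-- B collects the marker indices first and emits the slices between consecutive boundaries;
-- same O(n) cost, a different (two-phase, index-based) decomposition of the generator.

-- ===== PORT A =====
-- a = 0; for i,line in enumerate(lines): if marker: (yield lines[a:i] if i>a); a = i;  yield lines[a:]
def split_to_blocks (lines : List String) : List (List String) :=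
  let st := (PySem.List.enumerate lines 0).foldl
    (fun (s : Int × List (List String)) p =>
      if PySem.Str.startswith p.2 "inp " then
        (p.1, if s.1 < p.1 then s.2 ++ [PySem.List.slice lines (some s.1) (some p.1)] else s.2)
      else s) (0, [])
  st.2 ++ [PySem.List.slice lines (some st.1) none]

-- ===== PORT B =====
-- idx = [i for i,line in enumerate(lines) if line.startswith('inp ')]
-- boundaries = [0] + [i for i in idx if i > 0]
-- yield lines[b:c] for consecutive (b,c); yield lines[boundaries[-1]:]
-- (boundaries[-1]: boundaries is never empty, so getLastD's default is never used)
def split_to_blocks_alt (lines : List String) : List (List String) :=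
  let idx := ((PySem.List.enumerate lines 0).filter
    (fun p => PySem.Str.startswith p.2 "inp ")).map (fun p => p.1)
  let boundaries := [(0 : Int)] ++ idx.filter (fun i => 0 < i)
  ((boundaries.zip boundaries.tail).map
      (fun bc => PySem.List.slice lines (some bc.1) (some bc.2)))
    ++ [PySem.List.slice lines (some (boundaries.getLastD 0)) none]

-- ===== PRECONDITION & SPEC =====
def Spec_split_to_blocks (lines : List String) (out : List (List String)) : Prop := out = split_to_blocks_alt lines
instance (lines : List String) (out : List (List String)) : Decidable (Spec_split_to_blocks lines out) := by unfold Spec_split_to_blocks; infer_instance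

-- ===== CLAIM (what is proved, stated in full; the proofs are below) =====
def Claim_equal_split_to_blocks : Prop := ∀ (lines : List String), Dom_split_to_blocks lines → Spec_split_to_blocks lines (split_to_blocks lines)

-- ===== LEMMAS AND PROOFS =====

/-- The slices A emits while scanning, as a function of the marker-index list. -/
def slicesFrom (lines : List String) (a : Int) : List Int → List (List String)
  | [] => []
  | i :: r =>
      (if a < i then [PySem.List.slice lines (some a) (some i)] else []) ++ slicesFrom lines i r

/-- A's fold, characterised by the filtered marker-index list. -/
theorem foldA_eq (lines : List String) (ps : List (Int × String)) :
    ∀ (a : Int) (out : List (List String)),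
    ps.foldl
      (fun (s : Int × List (List String)) p =>
        if PySem.Str.startswith p.2 "inp " then
          (p.1, if s.1 < p.1 then s.2 ++ [PySem.List.slice lines (some s.1) (some p.1)] else s.2)
        else s) (a, out)
    = (((ps.filter (fun p => PySem.Str.startswith p.2 "inp ")).map (fun p => p.1)).getLastD a,
       out ++ slicesFrom lines a
         ((ps.filter (fun p => PySem.Str.startswith p.2 "inp ")).map (fun p => p.1))) := by
  induction ps with
  | nil => intro a out; simp [slicesFrom]
  | cons p rest ih =>
      intro a out
      rw [List.foldl_cons]
      by_cases h : PySem.Str.startswith p.2 "inp " = true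
      · have hfc : (p :: rest).filter (fun p => PySem.Str.startswith p.2 "inp ")
            = p :: rest.filter (fun p => PySem.Str.startswith p.2 "inp ") :=
          List.filter_cons_of_pos h
        rw [if_pos h, ih, hfc, List.map_cons, List.getLastD_cons]
        refine Prod.ext rfl ?_
        dsimp only
        rw [slicesFrom]
        by_cases hlt : a < p.1
        · rw [if_pos hlt, if_pos hlt, List.append_assoc, List.singleton_append]
        · rw [if_neg hlt, if_neg hlt, List.nil_append]
      · have hfc : (p :: rest).filter (fun p => PySem.Str.startswith p.2 "inp ")
            = rest.filter (fun p => PySem.Str.startswith p.2 "inp ") :=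
          List.filter_cons_of_neg (by simpa using h)
        rw [if_neg h, hfc]
        exact ih a out

/-- The zip of consecutive boundaries yields the scan slices, for a strictly increasing list. -/
theorem zip_slices_eq (lines : List String) :
    ∀ (l : List Int) (a : Int), (a :: l).Pairwise (· < ·) →
      (((a :: l).zip l).map (fun bc => PySem.List.slice lines (some bc.1) (some bc.2)))
        = slicesFrom lines a l := by
  intro l
  induction l with
  | nil => intro a _; simp [slicesFrom]
  | cons i r ih =>
      intro a hp
      have hai : a < i := (List.pairwise_cons.mp hp).1 i (by simp)
      have hr : (i :: r).Pairwise (· < ·) := (List.pairwise_cons.mp hp).2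
      rw [List.zip_cons_cons, List.map_cons, slicesFrom, if_pos hai, List.singleton_append,
        ih i hr]

/-- B's boundary decomposition agrees with the scan slices, for a sorted nonnegative index list. -/
theorem boundaries_eq (lines : List String) (idx : List Int)
    (hpw : idx.Pairwise (· < ·)) (hnn : ∀ x ∈ idx, 0 ≤ x) :
    slicesFrom lines 0 idx ++ [PySem.List.slice lines (some (idx.getLastD 0)) none]
    = ((([(0 : Int)] ++ idx.filter (fun i => 0 < i)).zip
          ([(0 : Int)] ++ idx.filter (fun i => 0 < i)).tail).map
        (fun bc => PySem.List.slice lines (some bc.1) (some bc.2)))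
      ++ [PySem.List.slice lines
            (some (([(0 : Int)] ++ idx.filter (fun i => 0 < i)).getLastD 0)) none] := by
  match idx with
  | [] => simp [slicesFrom]
  | i :: r =>
      have hr : r.Pairwise (· < ·) := (List.pairwise_cons.mp hpw).2
      have hir : ∀ x ∈ r, i < x := (List.pairwise_cons.mp hpw).1
      by_cases h0 : i = 0
      · subst h0
        have hrf : r.filter (fun i => (0 : Int) < i) = r :=
          List.filter_eq_self.mpr (fun x hx => by simpa using hir x hx)
        rw [List.singleton_append, List.filter_cons_of_neg (by simp), hrf]
        rw [List.tail_cons, zip_slices_eq lines r 0 hpw, slicesFrom,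
          if_neg (lt_irrefl 0), List.nil_append, List.getLastD_cons]
      · have hi0 : 0 < i := lt_of_le_of_ne (hnn i (by simp)) (Ne.symm h0)
        have hf : (i :: r).filter (fun i => (0 : Int) < i) = i :: r := by
          apply List.filter_eq_self.mpr
          intro x hx
          rcases List.mem_cons.mp hx with rfl | hx'
          · simpa using hi0
          · simpa using lt_trans hi0 (hir x hx')
        have hpw0 : ((0 : Int) :: i :: r).Pairwise (· < ·) := by
          refine List.pairwise_cons.mpr ⟨?_, hpw⟩
          intro x hx
          rcases List.mem_cons.mp hx with rfl | hx'
          · exact hi0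
          · exact lt_trans hi0 (hir x hx')
        rw [List.singleton_append, hf, List.tail_cons,
          zip_slices_eq lines (i :: r) 0 hpw0, List.getLastD_cons, List.getLastD_cons, List.getLastD_cons]

theorem split_to_blocks_spec : Claim_equal_split_to_blocks := by
  intro lines _
  unfold Spec_split_to_blocks split_to_blocks split_to_blocks_alt
  rw [foldA_eq]
  have hpw : (((PySem.List.enumerate lines 0).filter
      (fun p => PySem.Str.startswith p.2 "inp ")).map (fun p => p.1)).Pairwise (· < ·) := by
    rw [List.pairwise_map]
    exact (PySem.List.pairwise_lt_enumerate lines 0).filter _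
  have hnn : ∀ x ∈ (((PySem.List.enumerate lines 0).filter
      (fun p => PySem.Str.startswith p.2 "inp ")).map (fun p => p.1)), 0 ≤ x := by
    intro x hx
    obtain ⟨p, hpmem, rfl⟩ := List.mem_map.mp hx
    obtain ⟨k, _, rfl⟩ :=
      (PySem.List.mem_enumerate_iff _ _ _).mp (List.mem_of_mem_filter hpmem)
    simp
  exact boundaries_eq lines _ hpw hnn
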